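-- pv_equiv track=rewrite | github.com/RobertBogdanik/binghamacademy | assignments/chapter-15/tasks/15.13.py | countUppercaseHelper
-- ===== SOURCE A (Python) =====
-- def countUppercaseHelper(s, high):
--     if high == 0:
--         if s[0].isupper():
--             return 1
--         else:
--             return 0
--     else:
--         if s[high].isupper():
--             return 1 + countUppercaseHelper(s, high - 1)
--         else:
--             return countUppercaseHelper(s, high - 1)
-- ===== SOURCE B (Python) =====
-- def countUppercaseHelper(s, high):
--     count = 0
--     for i in range(high + 1):
--         if s[i].isupper():
--             count += 1
--     return count
-- ===== Notes on version B (the rewrite author's own statement) =====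
-- stated objective: alternative
-- what changed: Replaced the descending recursion with an iterative for-loop over range(high+1) that maintains a single running counter.
import Mathlib
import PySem

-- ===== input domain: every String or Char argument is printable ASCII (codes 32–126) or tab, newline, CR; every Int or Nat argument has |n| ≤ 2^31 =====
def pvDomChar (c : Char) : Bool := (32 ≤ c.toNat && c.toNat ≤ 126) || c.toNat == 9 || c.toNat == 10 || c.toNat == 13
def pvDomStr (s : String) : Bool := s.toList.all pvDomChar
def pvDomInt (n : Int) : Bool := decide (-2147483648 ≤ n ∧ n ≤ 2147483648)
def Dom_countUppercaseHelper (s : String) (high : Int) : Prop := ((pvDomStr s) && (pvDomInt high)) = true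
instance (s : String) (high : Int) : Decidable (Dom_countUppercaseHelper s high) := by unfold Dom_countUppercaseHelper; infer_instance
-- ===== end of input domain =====

-- B replaces A's descending recursion with an iterative loop over range(high+1) keeping a
-- running counter (objective: alternative); equivalence is about return values on Pre_.

-- ===== PORT A =====
-- A recurses from `high` down to 0, indexing s[i] at each step; where Python raises
-- IndexError (empty string at the base case, high out of range, or negative high, which
-- recurses past the base case until the index leaves range) the port returns 0 — those
-- inputs are excluded by Pre_.
def countUppercaseHelper (s : String) (high : Int) : Int :=
  if high = 0 then
    match PySem.List.pyGet? s.toList 0 with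
    | some c => if PySem.Chars.isupper c then 1 else 0
    | none => 0  -- IndexError in Python
  else if _h : high < 0 then 0  -- Python recurses to an eventual IndexError here
  else
    match PySem.List.pyGet? s.toList high with
    | some c =>
        if PySem.Chars.isupper c then 1 + countUppercaseHelper s (high - 1)
        else countUppercaseHelper s (high - 1)
    | none => 0  -- IndexError in Python
termination_by high.toNat
decreasing_by omega

-- ===== PORT B =====
-- count = 0; for i in range(high + 1): if s[i].isupper(): count += 1; return count
-- (s[i] is always in range inside Pre_; pyGetD's default is never read there)
def countUppercaseHelper_alt (s : String) (high : Int) : Int :=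
  (PySem.List.pyRange 0 (high + 1) 1).foldl
    (fun count i =>
      if PySem.Chars.isupper (PySem.List.pyGetD s.toList i ' ') then count + 1 else count) 0

-- ===== PRECONDITION & SPEC =====
-- Pre_: exactly the inputs on which the Python A returns (0 ≤ high < len(s)); elsewhere A raises IndexError.
def Pre_countUppercaseHelper (s : String) (high : Int) : Prop :=
  0 ≤ high ∧ high < (s.toList.length : Int)
instance (s : String) (high : Int) : Decidable (Pre_countUppercaseHelper s high) := by
  unfold Pre_countUppercaseHelper; infer_instance

def pvWitness_countUppercaseHelper : String × Int := ("Ab", 1)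

def Spec_countUppercaseHelper (s : String) (high : Int) (out : Int) : Prop := out = countUppercaseHelper_alt s high
instance (s : String) (high : Int) (out : Int) : Decidable (Spec_countUppercaseHelper s high out) := by unfold Spec_countUppercaseHelper; infer_instance

-- ===== CLAIM (what is proved, stated in full; the proofs are below) =====
def Claim_equal_countUppercaseHelper : Prop := ∀ (s : String) (high : Int), Dom_countUppercaseHelper s high → Pre_countUppercaseHelper s high → Spec_countUppercaseHelper s high (countUppercaseHelper s high)


-- ===== LEMMAS AND PROOFS =====

-- A's recursion, characterised: on an in-range natural index n it counts the uppercase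
-- characters among the first n+1 characters of s.
theorem countUppercaseHelper_eq_countP_take (s : String) (n : Nat)
    (h : n < s.toList.length) :
    countUppercaseHelper s (n : Int)
      = ((s.toList.take (n + 1)).countP (fun c => PySem.Chars.isupper c) : Int) := by
  induction n with
  | zero =>
      rw [countUppercaseHelper]
      have h0 : PySem.List.pyGet? s.toList (0 : Int) = some s.toList[0] :=
        PySem.List.pyGet?_ofNat s.toList 0 h
      have htake : s.toList.take (0 + 1) = s.toList.take 0 ++ [s.toList[0]] := by
        rw [List.take_add_one]; simp [List.getElem?_eq_getElem h]
      simp only [Int.natCast_zero, h0, htake]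
      simp [List.countP_cons]
  | succ n ih =>
      rw [countUppercaseHelper]
      have hne : ((n : Int) + 1) ≠ 0 := by omega
      have hnn : ¬ ((n : Int) + 1 < 0) := by omega
      have hn1 : n + 1 < s.toList.length := h
      have hg : PySem.List.pyGet? s.toList ((n + 1 : Nat) : Int) = some s.toList[n + 1] :=
        PySem.List.pyGet?_ofNat s.toList (n + 1) h
      have hcast : ((n + 1 : Nat) : Int) = (n : Int) + 1 := by push_cast; ring
      rw [hcast] at hg
      simp only [Int.natCast_succ, if_neg hne, dif_neg hnn, hg]
      have hsub : ((n : Int) + 1 - 1) = (n : Int) := by ring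
      rw [hsub, ih (by omega)]
      have htake : s.toList.take (n + 1 + 1)
          = s.toList.take (n + 1) ++ [s.toList[n + 1]] := by
        rw [List.take_add_one]
        simp [List.getElem?_eq_getElem hn1]
      rw [htake, List.countP_append]
      split_ifs with hu <;> simp [hu] <;> omega

-- B's loop, characterised: counting p over range(0, n+1) with in-range indices is countP
-- of the uppercase test over the first n+1 characters.
theorem countP_pyRange_eq_countP_take (l : List Char) (n : Nat)
    (h : n < l.length) :
    (PySem.List.pyRange 0 ((n : Int) + 1) 1).countP
        (fun i => PySem.Chars.isupper (PySem.List.pyGetD l i ' '))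
      = (l.take (n + 1)).countP (fun c => PySem.Chars.isupper c) := by
  induction n with
  | zero =>
      rw [show ((0 : Nat) : Int) + 1 = 0 + 1 from by norm_num,
        PySem.List.pyRange_one_singleton]
      have htake : l.take (0 + 1) = l.take 0 ++ [l[0]] := by
        rw [List.take_add_one]; simp [List.getElem?_eq_getElem h]
      simp [htake, List.countP_cons, PySem.List.pyGetD_zero,
        List.getD_eq_getElem?_getD, List.getElem?_eq_getElem h]
  | succ n ih =>
      have hsplit : PySem.List.pyRange 0 (((n + 1 : Nat) : Int) + 1) 1
          = PySem.List.pyRange 0 ((n : Int) + 1) 1 ++ [(n : Int) + 1] := by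
        rw [show ((n + 1 : Nat) : Int) + 1 = ((n : Int) + 1) + 1 from by push_cast; ring]
        exact PySem.List.pyRange_one_succ_right (by omega)
      have hget : PySem.List.pyGetD l ((n : Int) + 1) ' ' = l[n + 1] := by
        rw [show ((n : Int) + 1) = ((n + 1 : Nat) : Int) from by push_cast; ring,
          PySem.List.pyGetD_natCast]
        simp [List.getD_eq_getElem?_getD, List.getElem?_eq_getElem h]
      have htake : l.take (n + 1 + 1) = l.take (n + 1) ++ [l[n + 1]] := by
        rw [List.take_add_one]; simp [List.getElem?_eq_getElem h]
      rw [hsplit, htake, List.countP_append, List.countP_append,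
        ih (by omega), List.countP_singleton, List.countP_singleton, hget]

-- ===== VERDICT (by name: the statement is the Claim_ definition above) =====
theorem countUppercaseHelper_spec : Claim_equal_countUppercaseHelper := by
  intro s high _ hpre
  obtain ⟨h0, hlt⟩ := hpre
  unfold Spec_countUppercaseHelper countUppercaseHelper_alt
  obtain ⟨n, rfl⟩ : ∃ n : Nat, high = (n : Int) := ⟨high.toNat, by omega⟩
  have hn : n < s.toList.length := by exact_mod_cast hlt
  rw [countUppercaseHelper_eq_countP_take s n hn, PySem.List.foldl_if_add_one,
    countP_pyRange_eq_countP_take s.toList n hn]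
  norm_num
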